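-- pv_equiv track=rewrite | github.com/kailashmannem/leetcode-solutions | 3963-number-of-perfect-pairs/3963-number-of-perfect-pairs.py | perfectPairs
-- ===== SOURCE A (Python) =====
-- from typing import List
--
-- def perfectPairs(nums: List[int]) -> int:
--     ans, j, n = 0, 0, len(nums)
--     arr = sorted(abs(x) for x in nums)
--     for i in range(n):
--         if j < i + 1:
--             j = i + 1
--         while j < n and arr[j] <= 2*arr[i]:
--             j += 1
--         ans += (j - i - 1)
--     return ans
-- ===== SOURCE B (Python) =====
-- from typing import List
--
-- def perfectPairs(nums: List[int]) -> int:
--     # Brute force straight from the definition: count unordered index pairs of the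
--     # ORIGINAL list whose larger absolute value is at most twice the smaller one.
--     # No sorting and no pointer/search machinery at all.
--     ans = 0
--     for k, x in enumerate(nums):
--         ax = abs(x)
--         for y in nums[k + 1:]:
--             ay = abs(y)
--             lo, hi = (ax, ay) if ax <= ay else (ay, ax)
--             if hi <= 2 * lo:
--                 ans += 1
--     return ans
-- ===== Notes on version B (the rewrite author's own statement) =====
-- stated objective: simpler
-- what changed: Replaces A's sort-then-monotone-two-pointer sweep with a direct quadratic scan over all unordered pairs of the original (unsorted) list, checking max(|x|,|y|) <= 2*min(|x|,|y|) straight from the problem definition.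
import Mathlib
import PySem

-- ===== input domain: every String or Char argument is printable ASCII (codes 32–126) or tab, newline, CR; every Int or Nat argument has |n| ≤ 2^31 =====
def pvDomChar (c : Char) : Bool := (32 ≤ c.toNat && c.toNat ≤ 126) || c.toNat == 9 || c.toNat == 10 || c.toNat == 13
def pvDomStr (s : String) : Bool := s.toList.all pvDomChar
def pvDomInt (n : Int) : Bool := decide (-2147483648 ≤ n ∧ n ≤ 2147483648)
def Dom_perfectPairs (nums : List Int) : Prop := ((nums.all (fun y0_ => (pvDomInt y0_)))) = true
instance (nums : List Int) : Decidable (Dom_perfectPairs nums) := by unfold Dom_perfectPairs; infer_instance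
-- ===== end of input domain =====

-- B replaces A's sort + monotone two-pointer sweep with a direct quadratic scan over all
-- unordered pairs of the original (unsorted) list; return values are proved equal on all inputs.

-- ===== PORT A =====
-- inner 'while j < n and arr[j] <= 2*arr[i]: j += 1' of A (t = 2*arr[i])
-- fuel = arr.length - j bounds the number of iterations (structural recursion)
def whileAdvGo (arr : List Int) (t : Int) : Nat → Nat → Nat
  | 0, j => j
  | f + 1, j => if j < arr.length ∧ arr.getD j 0 ≤ t then whileAdvGo arr t f (j + 1) else j

def whileAdv (arr : List Int) (t : Int) (j : Nat) : Nat :=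
  whileAdvGo arr t (arr.length - j) j

-- one iteration of A's 'for i in range(n)' loop over the state (ans, j)
def stepA (arr : List Int) (s : Int × Nat) (i : Nat) : Int × Nat :=
  let j := if s.2 < i + 1 then i + 1 else s.2
  let j := whileAdv arr (2 * arr.getD i 0) j
  (s.1 + ((j : Int) - (i : Int) - 1), j)

def perfectPairs (nums : List Int) : Int :=
  let n := nums.length
  let arr := PySem.List.sorted (nums.map (fun x => |x|)) (fun x => x) false
  ((List.range n).foldl (stepA arr) (0, 0)).1

-- ===== PORT B =====
-- body of B's inner loop: 'lo, hi = (ax, ay) if ax <= ay else (ay, ax); hi <= 2*lo'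
def ppOK (x y : Int) : Bool :=
  let ax := |x|
  let ay := |y|
  let p := if ax ≤ ay then (ax, ay) else (ay, ax)
  decide (p.2 ≤ 2 * p.1)

-- B's nested loops: outer loop over positions k, inner loop over the suffix nums[k+1:]
def pairLoop : List Int → Nat
  | [] => 0
  | x :: xs => xs.countP (ppOK x) + pairLoop xs

def perfectPairs_alt (nums : List Int) : Int :=
  (pairLoop nums : Int)

-- ===== PRECONDITION & SPEC =====
def Spec_perfectPairs (nums : List Int) (out : Int) : Prop := out = perfectPairs_alt nums
instance (nums : List Int) (out : Int) : Decidable (Spec_perfectPairs nums out) := by unfold Spec_perfectPairs; infer_instance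

-- ===== CLAIM (what is proved, stated in full; the proofs are below) =====
def Claim_equal_perfectPairs : Prop := ∀ (nums : List Int), Dom_perfectPairs nums → Spec_perfectPairs nums (perfectPairs nums)

-- ===== LEMMAS AND PROOFS =====

theorem ppOK_eq (x y : Int) : ppOK x y = decide (max |x| |y| ≤ 2 * min |x| |y|) := by
  simp only [ppOK]
  split_ifs with h
  · simp only [decide_eq_decide]
    omega
  · simp only [decide_eq_decide]
    omega

theorem ppOK_symm (x y : Int) : ppOK x y = ppOK y x := by
  rw [ppOK_eq, ppOK_eq, max_comm, min_comm]

theorem ppOK_abs (x y : Int) : ppOK x y = ppOK |x| |y| := by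
  rw [ppOK_eq, ppOK_eq, abs_abs, abs_abs]

-- pair-counting with a symmetric predicate is invariant under permutation
theorem pairLoop_perm {l l' : List Int} (h : l.Perm l') : pairLoop l = pairLoop l' := by
  induction h with
  | nil => rfl
  | cons x _ ih => simp only [pairLoop, ih, List.Perm.countP_eq _ (by assumption)]
  | swap x y l =>
      simp only [pairLoop, List.countP_cons]
      rw [ppOK_symm y x]
      omega
  | trans _ _ ih1 ih2 => rw [ih1, ih2]

-- B over nums equals B over the absolute values
theorem pairLoop_map_abs (l : List Int) : pairLoop l = pairLoop (l.map (fun x => |x|)) := by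
  induction l with
  | nil => rfl
  | cons x xs ih =>
      simp only [pairLoop, List.map_cons, List.countP_map, ih]
      congr 1
      apply List.countP_congr
      intro y _
      rw [ppOK_abs x y]
      exact Iff.rfl

-- number of leading elements of arr that are ≤ t (for sorted arr: all elements ≤ t)
def cnt : List Int → Int → Nat
  | [], _ => 0
  | x :: xs, t => if x ≤ t then cnt xs t + 1 else 0

theorem cnt_le_length (arr : List Int) (t : Int) : cnt arr t ≤ arr.length := by
  induction arr with
  | nil => simp [cnt]
  | cons x xs ih => simp only [cnt, List.length_cons]; split <;> omega

theorem cnt_mono (arr : List Int) (t t' : Int) (h : t ≤ t') : cnt arr t ≤ cnt arr t' := by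
  induction arr with
  | nil => simp [cnt]
  | cons x xs ih =>
      simp only [cnt]
      split
      · rw [if_pos (by omega)]; omega
      · omega

theorem cnt_iff (arr : List Int) (t : Int) (hp : arr.Pairwise (· ≤ ·)) (k : Nat) :
    k < cnt arr t ↔ (k < arr.length ∧ arr.getD k 0 ≤ t) := by
  induction arr generalizing k with
  | nil => simp [cnt]
  | cons x xs ih =>
      rcases List.pairwise_cons.mp hp with ⟨hx, hxs⟩
      simp only [cnt]
      split
      · next hxt =>
          cases k with
          | zero => simpa using hxt
          | succ k =>
              simp only [List.length_cons, List.getD_cons_succ]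
              rw [Nat.succ_lt_succ_iff, ih hxs k]
              omega
      · next hxt =>
          cases k with
          | zero => simp_all
          | succ k =>
              simp only [List.length_cons, List.getD_cons_succ]
              constructor
              · omega
              · rintro ⟨hk, hle⟩
                have hmem : xs.getD k 0 ∈ xs := by
                  rw [List.getD_eq_getElem xs 0 (by omega)]
                  exact List.getElem_mem _
                exact absurd (le_trans (hx _ hmem) hle) hxt

-- for a sorted list, countP(· ≤ t) is the prefix count cnt
theorem countP_eq_cnt (arr : List Int) (t : Int) (hp : arr.Pairwise (· ≤ ·)) :
    arr.countP (fun y => decide (y ≤ t)) = cnt arr t := by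
  induction arr with
  | nil => rfl
  | cons x xs ih =>
      rcases List.pairwise_cons.mp hp with ⟨hx, hxs⟩
      by_cases hxt : x ≤ t
      · simp [cnt, hxt, ih hxs]
      · have hz : xs.countP (fun y => decide (y ≤ t)) = 0 := by
          rw [List.countP_eq_zero]
          intro y hy
          simp only [decide_eq_true_eq]
          intro hyt
          exact hxt (le_trans (hx y hy) hyt)
        simp [cnt, hxt, hz]

theorem whileAdvGo_eq (arr : List Int) (t : Int) (hp : arr.Pairwise (· ≤ ·)) (f j : Nat)
    (hj : j ≤ cnt arr t) (hf : arr.length - j ≤ f) : whileAdvGo arr t f j = cnt arr t := by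
  have hlen := cnt_le_length arr t
  induction f generalizing j with
  | zero => simp only [whileAdvGo]; omega
  | succ f ih =>
      rw [whileAdvGo]
      split
      · next h =>
          have hlt : j < cnt arr t := (cnt_iff arr t hp j).mpr h
          exact ih (j + 1) hlt (by omega)
      · next h =>
          rcases Nat.lt_or_ge j (cnt arr t) with hlt | hge
          · exact absurd ((cnt_iff arr t hp j).mp hlt) h
          · omega

theorem whileAdv_eq (arr : List Int) (t : Int) (hp : arr.Pairwise (· ≤ ·)) (j : Nat)
    (hj : j ≤ cnt arr t) : whileAdv arr t j = cnt arr t :=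
  whileAdvGo_eq arr t hp (arr.length - j) j hj le_rfl

theorem getD_mono (arr : List Int) (hp : arr.Pairwise (· ≤ ·)) (i k : Nat)
    (hik : i ≤ k) (hk : k < arr.length) : arr.getD i 0 ≤ arr.getD k 0 := by
  rcases Nat.lt_or_ge i k with h | h
  · rw [List.getD_eq_getElem arr 0 (by omega), List.getD_eq_getElem arr 0 hk]
    exact List.pairwise_iff_getElem.mp hp i k (by omega) hk h
  · have : i = k := by omega
    simp [this]

-- per-index summand of A's loop, as a pure function of i
def gA (arr : List Int) (i : Nat) : Int := (cnt arr (2 * arr.getD i 0) : Int) - i - 1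

-- A's fold computes the sum of gA, and its pointer j sits at cnt of the previous threshold
theorem fold_eqA (arr : List Int) (hp : arr.Pairwise (· ≤ ·)) (hnn : ∀ x ∈ arr, 0 ≤ x)
    (m : Nat) (hm : m ≤ arr.length) :
    ((List.range m).foldl (stepA arr) (0, 0)).1 = ((List.range m).map (gA arr)).sum ∧
    ((List.range m).foldl (stepA arr) (0, 0)).2 =
      (if m = 0 then 0 else cnt arr (2 * arr.getD (m - 1) 0)) := by
  induction m with
  | zero => simp
  | succ m ih =>
      rcases ih (by omega) with ⟨ih1, ih2⟩
      have hmlt : m < arr.length := by omega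
      have hnni : 0 ≤ arr.getD m 0 := by
        apply hnn
        rw [List.getD_eq_getElem arr 0 hmlt]
        exact List.getElem_mem _
      have hmc : m < cnt arr (2 * arr.getD m 0) :=
        (cnt_iff arr _ hp m).mpr ⟨hmlt, by omega⟩
      rw [List.range_succ, List.foldl_append, List.map_append, List.sum_append]
      simp only [List.foldl_cons, List.foldl_nil, List.map_cons, List.map_nil, List.sum_cons,
        List.sum_nil]
      set s := (List.range m).foldl (stepA arr) ((0 : Int), (0 : Nat)) with hs
      have hstart : (if s.2 < m + 1 then m + 1 else s.2) ≤ cnt arr (2 * arr.getD m 0) := by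
        rw [ih2]
        by_cases hm0 : m = 0
        · subst hm0
          simpa using hmc
        · simp only [if_neg hm0]
          have hd : arr.getD (m - 1) 0 ≤ arr.getD m 0 :=
            getD_mono arr hp (m - 1) m (by omega) hmlt
          have hmono : cnt arr (2 * arr.getD (m - 1) 0) ≤ cnt arr (2 * arr.getD m 0) :=
            cnt_mono arr _ _ (by omega)
          split <;> omega
      have hA : whileAdv arr (2 * arr.getD m 0) (if s.2 < m + 1 then m + 1 else s.2) =
          cnt arr (2 * arr.getD m 0) := whileAdv_eq arr _ hp _ hstart
      refine ⟨?_, ?_⟩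
      · simp only [stepA, hA, ih1, gA]
        ring
      · simp only [stepA, hA]
        simp

-- for sorted nonnegative arr, B's pair scan computes the same sum of gA
theorem pairLoop_eq_sum (arr : List Int) (hp : arr.Pairwise (· ≤ ·)) (hnn : ∀ x ∈ arr, 0 ≤ x) :
    (pairLoop arr : Int) = ((List.range arr.length).map (gA arr)).sum := by
  induction arr with
  | nil => simp [pairLoop]
  | cons x xs ih =>
      rcases List.pairwise_cons.mp hp with ⟨hx, hxs⟩
      have hx0 : 0 ≤ x := hnn x List.mem_cons_self
      have hnn' : ∀ y ∈ xs, 0 ≤ y := fun y hy => hnn y (List.mem_cons_of_mem x hy)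
      -- head contribution: countP (ppOK x) xs = cnt xs (2*x)
      have hhead : xs.countP (ppOK x) = cnt xs (2 * x) := by
        rw [← countP_eq_cnt xs (2 * x) hxs]
        apply List.countP_congr
        intro y hy
        rw [ppOK_eq]
        have h1 : x ≤ y := hx y hy
        have : max |x| |y| = y ∧ min |x| |y| = x := by
          constructor <;> · rw [abs_of_nonneg hx0, abs_of_nonneg (hnn' y hy)]; omega
        rw [this.1, this.2]
      -- the shifted summands over x :: xs are the summands over xs
      have hshift : ∀ i ∈ List.range xs.length, gA (x :: xs) (i + 1) = gA xs i := by
        intro i hi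
        have hi' : i < xs.length := List.mem_range.mp hi
        have hyi : xs.getD i 0 ∈ xs := by
          rw [List.getD_eq_getElem xs 0 hi']
          exact List.getElem_mem _
        have hxy : x ≤ 2 * xs.getD i 0 := by
          have := hx _ hyi
          have := hnn' _ hyi
          omega
        simp only [gA, List.getD_cons_succ, cnt, if_pos hxy]
        push_cast
        ring
      have hzero : gA (x :: xs) 0 = (cnt xs (2 * x) : Int) := by
        simp only [gA, List.getD_cons_zero, cnt, if_pos (by omega : x ≤ 2 * x)]
        push_cast
        ring
      calc (pairLoop (x :: xs) : Int)
          = (xs.countP (ppOK x) : Int) + (pairLoop xs : Int) := by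
            simp [pairLoop]
        _ = (cnt xs (2 * x) : Int) + ((List.range xs.length).map (gA xs)).sum := by
            rw [hhead, ih hxs hnn']
        _ = ((List.range (xs.length + 1)).map (gA (x :: xs))).sum := by
            rw [List.range_succ_eq_map, List.map_cons, List.sum_cons, List.map_map]
            rw [List.map_congr_left (fun i hi => (hshift i hi).symm)]
            rw [hzero]
            rfl
        _ = ((List.range (x :: xs).length).map (gA (x :: xs))).sum := by
            simp

-- ===== VERDICT (by name: the statement is the Claim_ definition above) =====
theorem perfectPairs_spec : Claim_equal_perfectPairs := by
  intro nums _
  unfold Spec_perfectPairs perfectPairs perfectPairs_alt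
  simp only
  set arr := PySem.List.sorted (nums.map (fun x => |x|)) (fun x => x) false with harr
  have hp : arr.Pairwise (· ≤ ·) := PySem.List.sorted_pairwise _ _
  have hnn : ∀ x ∈ arr, 0 ≤ x := by
    intro x hx
    have : x ∈ nums.map (fun x => |x|) := (PySem.List.mem_sorted _ _ _ _).mp hx
    rcases List.mem_map.mp this with ⟨y, _, rfl⟩
    exact abs_nonneg y
  have hlen : nums.length = arr.length := by
    rw [harr, PySem.List.length_sorted, List.length_map]
  have hperm : arr.Perm (nums.map (fun x => |x|)) := PySem.List.sorted_perm _ _ _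
  rw [hlen, (fold_eqA arr hp hnn arr.length le_rfl).1, ← pairLoop_eq_sum arr hp hnn,
    pairLoop_perm hperm, ← pairLoop_map_abs]
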